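-- pv_equiv track=rewrite | github.com/Matt-Aurora-Ventures/Jarvis | core/dexter/bot_integration.py | _format_for_twitter
-- ===== SOURCE A (Python) =====
-- from typing import Optional, Dict, Any
--
-- def _format_for_twitter(result: Dict[str, Any]) -> str:
--     """Format response for X/Twitter (short, tweet-friendly)."""
--     response = result.get("response", "")
--
--     # X has character limits - make it concise
--     # Keep only first 280 characters for single tweet
--     if len(response) > 280:
--         # Try to find a good break point
--         lines = response.split("\n")
--         short_response = ""
--         for line in lines:
--             if len(short_response) + len(line) + 1 <= 280:
--                 short_response += line + "\n"
--             else: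
--                 break
--
--         return short_response.strip() + "..."
--
--     return response
-- ===== SOURCE B (Python) =====
-- def _format_for_twitter(result):
--     """Format response for X/Twitter (short, tweet-friendly)."""
--     response = result.get("response", "")
--     if len(response) > 280:
--         lines = response.split("\n")
--         costs = [len(line) + 1 for line in lines]
--         totals = []
--         total = 0
--         for c in costs:
--             total += c
--             totals.append(total)
--         cutoff = sum(1 for t in totals if t <= 280)
--         short = "\n".join(lines[:cutoff]) + ("\n" if cutoff else "")
--         return short.strip() + "..."
--     return response
-- ===== Notes on version B (the rewrite author's own statement) =====
-- stated objective: alternative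
-- what changed: Replaces A's accumulate-and-break string-building loop with a prefix-sum table of line costs, a count of running totals <= 280 as the cutoff, and reconstruction by slice + '\n'.join.
import Mathlib
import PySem

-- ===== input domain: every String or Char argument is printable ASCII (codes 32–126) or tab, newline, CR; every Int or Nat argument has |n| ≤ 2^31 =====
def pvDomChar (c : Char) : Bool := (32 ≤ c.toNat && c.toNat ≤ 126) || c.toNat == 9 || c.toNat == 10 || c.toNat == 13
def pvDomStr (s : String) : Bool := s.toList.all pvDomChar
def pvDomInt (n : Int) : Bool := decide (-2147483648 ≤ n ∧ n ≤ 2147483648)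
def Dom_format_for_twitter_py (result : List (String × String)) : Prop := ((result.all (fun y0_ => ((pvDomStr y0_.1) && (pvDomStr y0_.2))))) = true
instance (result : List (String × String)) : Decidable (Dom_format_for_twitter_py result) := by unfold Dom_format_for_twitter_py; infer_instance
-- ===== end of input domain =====

-- B builds a prefix-sum table of line costs and reconstructs via take/join instead of
-- A's accumulate-and-break string loop (objective: alternative decomposition, same cost).

-- ===== PORT A =====
-- the 'for line in lines: … else: break' loop of A, carrying short_response
def fmtLoopA : List (List Char) → List Char → List Char
  | [], acc => acc
  | l :: rest, acc =>
      if acc.length + l.length + 1 ≤ 280 then fmtLoopA rest (acc ++ l ++ ['\n']) else acc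

def format_for_twitter_py (result : List (String × String)) : String :=
  let response := (PySem.Dict.mk result).getD "response" ""
  if 280 < PySem.Str.len response then
    let lines := PySem.Chars.splitOn response.toList ['\n']
    String.ofList (PySem.Chars.strip (fmtLoopA lines []) ++ "...".toList)
  else response

-- ===== PORT B =====
-- the 'for c in costs: total += c; totals.append(total)' loop of B
def runTotals : List Nat → Nat → List Nat
  | [], _ => []
  | c :: cs, t => (t + c) :: runTotals cs (t + c)

def format_for_twitter_py_alt (result : List (String × String)) : String :=
  let response := (PySem.Dict.mk result).getD "response" ""
  if 280 < PySem.Str.len response then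
    let lines := PySem.Chars.splitOn response.toList ['\n']
    let costs := lines.map (fun l => l.length + 1)
    let totals := runTotals costs 0
    let cutoff := (totals.filter (· ≤ 280)).length
    let short := PySem.Chars.join ['\n'] (lines.take cutoff) ++
                 (if cutoff ≠ 0 then ['\n'] else [])
    String.ofList (PySem.Chars.strip short ++ "...".toList)
  else response

-- ===== PRECONDITION & SPEC =====
def Spec_format_for_twitter_py (result : List (String × String)) (out : String) : Prop := out = format_for_twitter_py_alt result
instance (result : List (String × String)) (out : String) : Decidable (Spec_format_for_twitter_py result out) := by unfold Spec_format_for_twitter_py; infer_instance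

-- ===== CLAIM (what is proved, stated in full; the proofs are below) =====
def Claim_equal_format_for_twitter_py : Prop := ∀ (result : List (String × String)), Dom_format_for_twitter_py result → Spec_format_for_twitter_py result (format_for_twitter_py result)

-- ===== LEMMAS AND PROOFS =====

-- budgeted form of A's loop: what gets appended after acc, with remaining budget b
def chunkF : List (List Char) → Nat → List Char
  | [], _ => []
  | l :: rest, b =>
      if l.length + 1 ≤ b then l ++ '\n' :: chunkF rest (b - (l.length + 1)) else []

-- count of prefixes whose running total stays ≤ b (the B-side cutoff, budgeted)
def cntF (cs : List Nat) (b : Nat) : Nat := ((runTotals cs 0).filter (· ≤ b)).length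

lemma runTotals_shift (cs : List Nat) : ∀ t, runTotals cs t = (runTotals cs 0).map (t + ·) := by
  induction cs with
  | nil => intro t; rfl
  | cons c cs ih =>
      intro t
      simp only [runTotals, Nat.zero_add, List.map_cons]
      refine congrArg (List.cons (t + c)) ?_
      rw [ih (t + c), ih c, List.map_map]
      congr 1
      funext x
      simp [Nat.add_assoc]

lemma cntF_cons (c : Nat) (cs : List Nat) (b : Nat) :
    cntF (c :: cs) b = if c ≤ b then 1 + cntF cs (b - c) else 0 := by
  unfold cntF
  simp only [runTotals, Nat.zero_add, runTotals_shift cs c, List.filter_cons, List.filter_map]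
  by_cases h : c ≤ b
  · simp only [h, decide_true, if_pos, List.length_cons]
    rw [List.filter_congr (l := runTotals cs 0)
      (q := fun x => decide (x ≤ b - c)) (by intro x _; simp [Function.comp]; omega)]
    rw [List.length_map]
    omega
  · simp only [h, decide_false, if_false, Bool.false_eq_true]
    rw [List.filter_eq_nil_iff.mpr (by intro x _; simp [Function.comp]; omega)]
    rfl

lemma cntF_le_length (cs : List Nat) (b : Nat) : cntF cs b ≤ cs.length := by
  induction cs generalizing b with
  | nil => simp [cntF, runTotals]
  | cons c cs ih =>
      rw [cntF_cons]
      split_ifs with h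
      · have := ih (b - c); simp; omega
      · simp

lemma chunkF_eq (lines : List (List Char)) : ∀ b,
    chunkF lines b =
      PySem.Chars.join ['\n'] (lines.take (cntF (lines.map (fun l => l.length + 1)) b)) ++
        (if cntF (lines.map (fun l => l.length + 1)) b ≠ 0 then ['\n'] else []) := by
  induction lines with
  | nil => intro b; simp [chunkF, cntF, runTotals, PySem.Chars.join_nil]
  | cons l rest ih =>
      intro b
      simp only [List.map_cons, cntF_cons]
      by_cases h : l.length + 1 ≤ b
      · rw [if_pos h]
        have hloop : chunkF (l :: rest) b = l ++ '\n' :: chunkF rest (b - (l.length + 1)) := by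
          simp [chunkF, h]
        rw [hloop, ih (b - (l.length + 1))]
        rcases hK : cntF (rest.map (fun l => l.length + 1)) (b - (l.length + 1)) with _ | k'
        · simp [PySem.Chars.join_nil, PySem.Chars.join_singleton]
        · have hlen : k' + 1 ≤ rest.length := by
            have := cntF_le_length (rest.map (fun l => l.length + 1)) (b - (l.length + 1))
            rw [hK, List.length_map] at this
            exact this
          cases rest with
          | nil => simp at hlen
          | cons r rs =>
              have h1 : (1 : Nat) + (k' + 1) = (k' + 1) + 1 := by omega
              rw [h1]
              simp only [List.take_succ_cons, ne_eq, Nat.succ_ne_zero, not_false_iff, if_pos,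
                PySem.Chars.join_cons_cons]
              simp
      · rw [if_neg h]
        simp [chunkF, h, PySem.Chars.join_nil]

lemma fmtLoopA_eq (lines : List (List Char)) : ∀ (acc : List Char) (b : Nat),
    acc.length + b = 280 → fmtLoopA lines acc = acc ++ chunkF lines b := by
  induction lines with
  | nil => intro acc b _; simp [fmtLoopA, chunkF]
  | cons l rest ih =>
      intro acc b hb
      simp only [fmtLoopA, chunkF]
      by_cases h : l.length + 1 ≤ b
      · have h' : acc.length + l.length + 1 ≤ 280 := by omega
        rw [if_pos h', if_pos h, ih (acc ++ l ++ ['\n']) (b - (l.length + 1)) (by simp; omega)]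
        simp
      · have h' : ¬ acc.length + l.length + 1 ≤ 280 := by omega
        rw [if_neg h', if_neg h]
        simp

-- ===== VERDICT (by name: the statement is the Claim_ definition above) =====
theorem format_for_twitter_py_spec : Claim_equal_format_for_twitter_py := by
  intro result _
  unfold Spec_format_for_twitter_py format_for_twitter_py format_for_twitter_py_alt
  simp only []
  by_cases h : 280 < PySem.Str.len ((PySem.Dict.mk result).getD "response" "")
  · rw [if_pos h, if_pos h]
    have := fmtLoopA_eq
      (PySem.Chars.splitOn ((PySem.Dict.mk result).getD "response" "").toList ['\n']) [] 280 rfl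
    rw [this, List.nil_append, chunkF_eq]
    rfl
  · rw [if_neg h, if_neg h]
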